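-- pv_equiv track=rewrite | github.com/VV1NN/APT_Attribution_Thesis | scripts/eval_edge_type_analysis.py | analyze_no_match_deeper
-- ===== SOURCE A (Python) =====
-- from collections import Counter, defaultdict
--
-- def analyze_no_match_deeper(l0_iocs, adj, node_depth, node_reports):
--     """更深入分析 no-match IoC：有沒有 VT 鄰居、鄰居在不在 KG。"""
--     report_to_iocs = defaultdict(list)
--     for v_id, v_org in l0_iocs:
--         reports = node_reports.get(v_id, [])
--         key = reports[0] if reports else f"__no_report_{v_id}"
--         report_to_iocs[key].append((v_id, v_org))
--
--     all_kg_nodes = set(node_depth.keys())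
--     l1_to_l0 = defaultdict(set)
--     l0_set = {nid for nid, d in node_depth.items() if d == 0}
--     for n, neighbors in adj.items():
--         if node_depth.get(n) != 1:
--             continue
--         for nb in neighbors:
--             if nb in l0_set:
--                 l1_to_l0[n].add(nb)
--
--     # 統計各類型 IoC 的 no-match 細分
--     type_stats = defaultdict(lambda: {
--         "total": 0,
--         "no_kg_neighbors": 0,
--         "all_exclusive_removed": 0,
--         "has_match": 0,
--     })
--
--     for report_key, report_iocs in report_to_iocs.items():
--         report_ioc_set = {v_id for v_id, _ in report_iocs}
--         exclusive_l1 = set()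
--         for v_id in report_ioc_set:
--             for n in adj.get(v_id, set()):
--                 if node_depth.get(n) != 1:
--                     continue
--                 l0_parents = l1_to_l0.get(n, set())
--                 if l0_parents and l0_parents.issubset(report_ioc_set):
--                     exclusive_l1.add(n)
--         removed = report_ioc_set | exclusive_l1
--
--         for v_id, v_org in report_iocs:
--             ioc_type = v_id.split("_")[0]  # file, domain, ip
--             type_stats[ioc_type]["total"] += 1
--
--             v_neighbors = adj.get(v_id, set())
--             matched = v_neighbors - removed
--
--             if matched:
--                 type_stats[ioc_type]["has_match"] += 1
--             elif not v_neighbors: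
--                 type_stats[ioc_type]["no_kg_neighbors"] += 1
--             else:
--                 type_stats[ioc_type]["all_exclusive_removed"] += 1
--
--     return type_stats
-- ===== SOURCE B (Python) =====
-- def analyze_no_match_deeper(l0_iocs, adj, node_depth, node_reports):
--     """Same statistics, computed without any exclusive/removed set construction:
--     each neighbour is judged by a direct predicate ('is it this report's IoC, or a
--     depth-1 node all of whose L0 parents are this report's IoCs?')."""
--     def key_of(v_id):
--         reports = node_reports.get(v_id, [])
--         return reports[0] if reports else f"__no_report_{v_id}"
--
--     ioc_key = {}
--     groups = {}
--     for v_id, v_org in l0_iocs: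
--         k = key_of(v_id)
--         ioc_key[v_id] = k
--         groups.setdefault(k, []).append((v_id, v_org))
--
--     l0 = {nid for nid, d in node_depth.items() if d == 0}
--
--     def removed(n, k):
--         # n is removed for report k iff it is one of k's IoCs, or a depth-1
--         # node whose (nonempty) L0 parents are all IoCs of k.
--         if ioc_key.get(n) == k:
--             return True
--         if node_depth.get(n) != 1:
--             return False
--         parents = [nb for nb in adj.get(n, []) if nb in l0]
--         return bool(parents) and all(ioc_key.get(p) == k for p in parents)
--
--     type_stats = {}
--     for k, group in groups.items():
--         for v_id, v_org in group:
--             ioc_type = v_id.split("_")[0]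
--             st = type_stats.setdefault(ioc_type, {
--                 "total": 0,
--                 "no_kg_neighbors": 0,
--                 "all_exclusive_removed": 0,
--                 "has_match": 0,
--             })
--             st["total"] += 1
--             nbrs = adj.get(v_id, [])
--             if any(not removed(n, k) for n in nbrs):
--                 st["has_match"] += 1
--             elif not nbrs:
--                 st["no_kg_neighbors"] += 1
--             else:
--                 st["all_exclusive_removed"] += 1
--     return type_stats
-- ===== Notes on version B (the rewrite author's own statement) =====
-- stated objective: simpler
-- what changed: B replaces A's whole set machinery (the l1_to_l0 neighbour map, the per-report exclusive_l1 set, the removed union and the set difference) with a single boolean predicate removed(n, k) evaluated per neighbour (is n one of report k's IoCs, or a depth-1 node whose nonempty L0 parents all carry key k?); Pre_ only excludes adj association lists with duplicate keys, which no Python dict argument can produce.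
import Mathlib
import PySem

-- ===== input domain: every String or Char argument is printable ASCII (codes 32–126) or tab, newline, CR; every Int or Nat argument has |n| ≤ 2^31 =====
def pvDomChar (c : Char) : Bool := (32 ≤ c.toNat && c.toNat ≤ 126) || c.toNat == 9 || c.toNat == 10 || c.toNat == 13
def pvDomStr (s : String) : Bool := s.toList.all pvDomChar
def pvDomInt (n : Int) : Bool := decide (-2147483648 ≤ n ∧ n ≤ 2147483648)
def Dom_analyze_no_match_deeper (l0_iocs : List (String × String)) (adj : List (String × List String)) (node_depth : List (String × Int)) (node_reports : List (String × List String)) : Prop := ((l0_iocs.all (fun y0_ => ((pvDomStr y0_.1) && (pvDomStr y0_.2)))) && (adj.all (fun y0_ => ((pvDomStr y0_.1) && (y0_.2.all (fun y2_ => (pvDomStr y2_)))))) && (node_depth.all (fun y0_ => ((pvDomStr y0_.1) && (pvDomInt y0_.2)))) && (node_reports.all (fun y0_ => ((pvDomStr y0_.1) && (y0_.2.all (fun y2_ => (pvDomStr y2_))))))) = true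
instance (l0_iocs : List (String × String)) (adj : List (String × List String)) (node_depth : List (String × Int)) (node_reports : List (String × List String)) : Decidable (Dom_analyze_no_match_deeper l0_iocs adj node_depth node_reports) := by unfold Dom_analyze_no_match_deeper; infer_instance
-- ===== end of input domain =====

-- B drops A's whole removed/exclusive SET machinery (l1_to_l0 map, per-report exclusive set,
-- set difference): each neighbour is judged by a direct boolean predicate instead. Return value only.

-- ===== shared helpers (identical subexpressions of both Pythons) =====
-- reports[0] if reports else f"__no_report_{v_id}", with reports = node_reports.get(v_id, [])
def pvKey (node_reports : List (String × List String)) (v_id : String) : String :=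
  match (PySem.Dict.mk node_reports).getD v_id [] with
  | [] => "__no_report_" ++ v_id
  | r :: _ => r

def pvDepth (node_depth : List (String × Int)) (n : String) : Option Int :=
  (PySem.Dict.mk node_depth).get? n

def pvAdjGet (adj : List (String × List String)) (v : String) : List String :=
  (PySem.Dict.mk adj).getD v []

-- {nid for nid, d in node_depth.items() if d == 0}
def pvL0Set (node_depth : List (String × Int)) : PySem.Set String :=
  PySem.Set.ofList ((node_depth.filter (fun p => p.2 == 0)).map (fun p => p.1))

-- the defaultdict / setdefault default {"total":0, "no_kg_neighbors":0, "all_exclusive_removed":0, "has_match":0}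
def pvStats0 : PySem.Dict String Int :=
  PySem.Dict.mk [("total", 0), ("no_kg_neighbors", 0), ("all_exclusive_removed", 0), ("has_match", 0)]

-- ===== PORT A =====
-- A's report_to_iocs grouping loop (defaultdict(list))
def pvGroup (l0_iocs : List (String × String)) (node_reports : List (String × List String)) :
    PySem.Dict String (List (String × String)) :=
  l0_iocs.foldl (fun d p => d.modify (pvKey node_reports p.1) [] (fun l => l ++ [p])) PySem.Dict.empty

-- A's l1_to_l0: defaultdict(set) filled neighbour by neighbour
def pvL1A (adj : List (String × List String)) (node_depth : List (String × Int)) :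
    PySem.Dict String (PySem.Set String) :=
  adj.foldl (fun d e =>
    if pvDepth node_depth e.1 ≠ some 1 then d
    else e.2.foldl (fun d nb =>
      if (pvL0Set node_depth).contains nb then d.modify e.1 [] (fun s => PySem.Set.add s nb) else d) d)
    PySem.Dict.empty

-- A's per-report exclusive_l1 scan over every report IoC's neighbours
def pvExclA (adj : List (String × List String)) (node_depth : List (String × Int))
    (L : PySem.Dict String (PySem.Set String)) (S : PySem.Set String) : PySem.Set String :=
  S.foldl (fun ex v_id =>
    (pvAdjGet adj v_id).foldl (fun ex n =>
      if pvDepth node_depth n ≠ some 1 then ex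
      else if L.getD n [] ≠ [] ∧ PySem.Set.issubset (L.getD n []) S = true then PySem.Set.add ex n
      else ex) ex) PySem.Set.empty

-- A's classification step (defaultdict: modify with the default dict)
def pvStepA (adj : List (String × List String)) (removed : PySem.Set String)
    (ts : PySem.Dict String (PySem.Dict String Int)) (q : String × String) :
    PySem.Dict String (PySem.Dict String Int) :=
  let ioc_type := ((PySem.Str.split? q.1 "_").getD []).headD ""  -- v_id.split("_")[0]; split is never empty
  let ts := ts.modify ioc_type pvStats0 (fun c => c.modify "total" 0 (fun x => x + 1))
  let v_neighbors := pvAdjGet adj q.1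
  let matched := PySem.Set.diff v_neighbors removed
  if matched ≠ [] then ts.modify ioc_type pvStats0 (fun c => c.modify "has_match" 0 (fun x => x + 1))
  else if v_neighbors = [] then ts.modify ioc_type pvStats0 (fun c => c.modify "no_kg_neighbors" 0 (fun x => x + 1))
  else ts.modify ioc_type pvStats0 (fun c => c.modify "all_exclusive_removed" 0 (fun x => x + 1))

def analyze_no_match_deeper (l0_iocs : List (String × String)) (adj : List (String × List String)) (node_depth : List (String × Int)) (node_reports : List (String × List String)) : List (String × List (String × Int)) :=
  ((pvGroup l0_iocs node_reports).items.foldl (fun ts ri =>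
      ri.2.foldl (pvStepA adj
        (PySem.Set.union (PySem.Set.ofList (ri.2.map (fun p => p.1)))
          (pvExclA adj node_depth (pvL1A adj node_depth)
            (PySem.Set.ofList (ri.2.map (fun p => p.1)))))) ts)
    PySem.Dict.empty).items.map (fun p => (p.1, p.2.items))

-- ===== PORT B =====
-- B's single first loop fills ioc_key and the report groups together
def pvFirstB (l0_iocs : List (String × String)) (node_reports : List (String × List String)) :
    PySem.Dict String String × PySem.Dict String (List (String × String)) :=
  l0_iocs.foldl (fun ab p =>
    (ab.1.insert p.1 (pvKey node_reports p.1),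
     ab.2.modify (pvKey node_reports p.1) [] (fun l => l ++ [p])))
    (PySem.Dict.empty, PySem.Dict.empty)

-- B's removed(n, k): direct predicate, no set is ever built
def pvRemovedB (adj : List (String × List String)) (node_depth : List (String × Int))
    (ioc_key : PySem.Dict String String) (n k : String) : Bool :=
  if ioc_key.get? n == some k then true
  else if !(pvDepth node_depth n == some 1) then false
  else
    let parents := (pvAdjGet adj n).filter (fun nb => (pvL0Set node_depth).contains nb)
    !parents.isEmpty && parents.all (fun p => ioc_key.get? p == some k)

-- B's classification step: setdefault, then any-neighbour-survives test
def pvStepB (adj : List (String × List String)) (node_depth : List (String × Int))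
    (ioc_key : PySem.Dict String String) (k : String)
    (ts : PySem.Dict String (PySem.Dict String Int)) (q : String × String) :
    PySem.Dict String (PySem.Dict String Int) :=
  let ioc_type := ((PySem.Str.split? q.1 "_").getD []).headD ""
  let ts := ts.setdefault ioc_type pvStats0
  let ts := ts.modify ioc_type pvStats0 (fun c => c.modify "total" 0 (fun x => x + 1))
  let nbrs := pvAdjGet adj q.1
  if nbrs.any (fun n => !(pvRemovedB adj node_depth ioc_key n k)) then
    ts.modify ioc_type pvStats0 (fun c => c.modify "has_match" 0 (fun x => x + 1))
  else if nbrs.isEmpty then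
    ts.modify ioc_type pvStats0 (fun c => c.modify "no_kg_neighbors" 0 (fun x => x + 1))
  else ts.modify ioc_type pvStats0 (fun c => c.modify "all_exclusive_removed" 0 (fun x => x + 1))

def analyze_no_match_deeper_alt (l0_iocs : List (String × String)) (adj : List (String × List String)) (node_depth : List (String × Int)) (node_reports : List (String × List String)) : List (String × List (String × Int)) :=
  ((pvFirstB l0_iocs node_reports).2.items.foldl (fun ts ri =>
      ri.2.foldl (pvStepB adj node_depth (pvFirstB l0_iocs node_reports).1 ri.1) ts)
    PySem.Dict.empty).items.map (fun p => (p.1, p.2.items))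

-- ===== PRECONDITION & SPEC =====
-- Pre_ excludes only association lists giving adj a duplicate key: those correspond to no
-- Python dict (A's argument adj is a dict), so A is never run on them.
def Pre_analyze_no_match_deeper (l0_iocs : List (String × String)) (adj : List (String × List String)) (node_depth : List (String × Int)) (node_reports : List (String × List String)) : Prop :=
  (adj.map Prod.fst).Nodup
instance (l0_iocs : List (String × String)) (adj : List (String × List String)) (node_depth : List (String × Int)) (node_reports : List (String × List String)) : Decidable (Pre_analyze_no_match_deeper l0_iocs adj node_depth node_reports) := by unfold Pre_analyze_no_match_deeper; infer_instance

def pvWitness_analyze_no_match_deeper : (List (String × String)) × (List (String × List String)) × (List (String × Int)) × (List (String × List String)) :=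
  ([("file_a", "o1")], [("file_a", ["n1"]), ("n1", ["file_a"])], [("file_a", 0), ("n1", 1)], [("file_a", ["r1"])])

def Spec_analyze_no_match_deeper (l0_iocs : List (String × String)) (adj : List (String × List String)) (node_depth : List (String × Int)) (node_reports : List (String × List String)) (out : List (String × List (String × Int))) : Prop := out = analyze_no_match_deeper_alt l0_iocs adj node_depth node_reports
instance (l0_iocs : List (String × String)) (adj : List (String × List String)) (node_depth : List (String × Int)) (node_reports : List (String × List String)) (out : List (String × List (String × Int))) : Decidable (Spec_analyze_no_match_deeper l0_iocs adj node_depth node_reports out) := by unfold Spec_analyze_no_match_deeper; infer_instance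

-- ===== CLAIM (what is proved, stated in full; the proofs are below) =====
def Claim_equal_analyze_no_match_deeper : Prop := ∀ (l0_iocs : List (String × String)) (adj : List (String × List String)) (node_depth : List (String × Int)) (node_reports : List (String × List String)), Dom_analyze_no_match_deeper l0_iocs adj node_depth node_reports → Pre_analyze_no_match_deeper l0_iocs adj node_depth node_reports → Spec_analyze_no_match_deeper l0_iocs adj node_depth node_reports (analyze_no_match_deeper l0_iocs adj node_depth node_reports)

-- ===== LEMMAS AND PROOFS =====

-- B's first loop splits into its two independent components
theorem pvFirstB_eq (l0_iocs : List (String × String)) (node_reports : List (String × List String)) :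
    pvFirstB l0_iocs node_reports =
      (l0_iocs.foldl (fun d p => d.insert p.1 (pvKey node_reports p.1)) PySem.Dict.empty,
       pvGroup l0_iocs node_reports) := by
  unfold pvFirstB pvGroup
  exact PySem.List.foldl_prod_mk
    (fun (d : PySem.Dict String String) (p : String × String) =>
      d.insert p.1 (pvKey node_reports p.1))
    (fun (d : PySem.Dict String (List (String × String))) (p : String × String) =>
      d.modify (pvKey node_reports p.1) [] (fun l => l ++ [p]))
    l0_iocs PySem.Dict.empty PySem.Dict.empty

theorem pvInsertKey_get? (node_reports : List (String × List String))
    (l : List (String × String)) (d : PySem.Dict String String) (v : String) :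
    (l.foldl (fun d p => d.insert p.1 (pvKey node_reports p.1)) d).get? v =
      if v ∈ l.map Prod.fst then some (pvKey node_reports v) else d.get? v := by
  induction l generalizing d with
  | nil => simp
  | cons p t ih =>
    simp only [List.foldl_cons, ih, List.map_cons, List.mem_cons]
    by_cases hv : v ∈ t.map Prod.fst
    · simp [hv]
    · by_cases hvp : v = p.1
      · simp [hv, hvp, PySem.Dict.get?_insert]
      · simp [hv, hvp, PySem.Dict.get?_insert]

-- B's ioc_key lookup: the report key of every IoC id, nothing else
theorem pvFirstB_fst_get? (l0_iocs : List (String × String)) (node_reports : List (String × List String))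
    (v : String) :
    (pvFirstB l0_iocs node_reports).1.get? v =
      if v ∈ l0_iocs.map Prod.fst then some (pvKey node_reports v) else none := by
  rw [pvFirstB_eq]
  simp [pvInsertKey_get?, PySem.Dict.get?_empty]

theorem pvGroup_getD (l0_iocs : List (String × String)) (node_reports : List (String × List String))
    (k : String) :
    (pvGroup l0_iocs node_reports).getD k [] =
      l0_iocs.filter (fun p => pvKey node_reports p.1 == k) := by
  have h : pvGroup l0_iocs node_reports =
      (l0_iocs.map (fun p => (pvKey node_reports p.1, p))).foldl
        (fun d q => d.modify q.1 [] (fun l => l ++ [q.2])) PySem.Dict.empty := by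
    unfold pvGroup; rw [List.foldl_map]
  rw [h, PySem.Dict.getD_foldl_modify_append]
  simp [List.filter_map, Function.comp_def, List.map_map]

theorem pvGroup_keys_nodup (l0_iocs : List (String × String)) (node_reports : List (String × List String)) :
    (pvGroup l0_iocs node_reports).keys.Nodup := by
  unfold pvGroup
  exact PySem.Dict.nodup_keys_foldl_modify_key l0_iocs (fun p => pvKey node_reports p.1) []
    (fun _ p => fun l => l ++ [p]) PySem.Dict.empty (by simp [PySem.Dict.empty, PySem.Dict.keys])

theorem pvGroup_mem_items (l0_iocs : List (String × String)) (node_reports : List (String × List String))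
    (ri : String × List (String × String)) (h : ri ∈ (pvGroup l0_iocs node_reports).items) :
    ri.2 = l0_iocs.filter (fun p => pvKey node_reports p.1 == ri.1) := by
  obtain ⟨k, iocs⟩ := ri
  have hg := PySem.Dict.getD_of_mem_items (pvGroup l0_iocs node_reports) h
    (pvGroup_keys_nodup l0_iocs node_reports) []
  simpa [pvGroup_getD] using hg.symm

theorem pvL1A_inner_mem (node_depth : List (String × Int)) (n0 : String) (nbrs : List String)
    (d : PySem.Dict String (PySem.Set String)) (n p : String) :
    p ∈ (nbrs.foldl (fun d nb =>
          if (pvL0Set node_depth).contains nb then d.modify n0 [] (fun s => PySem.Set.add s nb) else d)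
        d).getD n [] ↔
      p ∈ d.getD n [] ∨ (n = n0 ∧ p ∈ nbrs ∧ (pvL0Set node_depth).contains p = true) := by
  induction nbrs generalizing d with
  | nil => simp
  | cons nb t ih =>
    simp only [List.foldl_cons]
    by_cases hc : (pvL0Set node_depth).contains nb = true
    · rw [if_pos hc, ih, PySem.Dict.getD_modify]
      by_cases hn : n = n0
      · subst hn
        rw [if_pos rfl]
        constructor
        · rintro (h | ⟨_, h2, h3⟩)
          · rcases (PySem.Set.mem_add _ _ _).mp h with h' | rfl
            · exact Or.inl h'
            · exact Or.inr ⟨rfl, by simp, hc⟩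
          · exact Or.inr ⟨rfl, List.mem_cons_of_mem _ h2, h3⟩
        · rintro (h | ⟨_, h2, h3⟩)
          · exact Or.inl ((PySem.Set.mem_add _ _ _).mpr (Or.inl h))
          · rcases List.mem_cons.mp h2 with rfl | h2'
            · exact Or.inl ((PySem.Set.mem_add _ _ _).mpr (Or.inr rfl))
            · exact Or.inr ⟨rfl, h2', h3⟩
      · rw [if_neg hn]
        constructor
        · rintro (h | ⟨h1, _, _⟩)
          · exact Or.inl h
          · exact absurd h1 hn
        · rintro (h | ⟨h1, _, _⟩)
          · exact Or.inl h
          · exact absurd h1 hn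
    · rw [if_neg hc, ih]
      constructor
      · rintro (h | ⟨h1, h2, h3⟩)
        · exact Or.inl h
        · exact Or.inr ⟨h1, List.mem_cons_of_mem _ h2, h3⟩
      · rintro (h | ⟨h1, h2, h3⟩)
        · exact Or.inl h
        · rcases List.mem_cons.mp h2 with rfl | h2'
          · exact absurd h3 hc
          · exact Or.inr ⟨h1, h2', h3⟩

theorem pvL1A_mem (adj : List (String × List String)) (node_depth : List (String × Int))
    (n p : String) :
    p ∈ (pvL1A adj node_depth).getD n [] ↔
      ∃ e ∈ adj, e.1 = n ∧ pvDepth node_depth e.1 = some 1 ∧ p ∈ e.2 ∧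
        (pvL0Set node_depth).contains p = true := by
  have aux : ∀ (l : List (String × List String)) (d : PySem.Dict String (PySem.Set String)),
      p ∈ (l.foldl (fun d e =>
            if pvDepth node_depth e.1 ≠ some 1 then d
            else e.2.foldl (fun d nb =>
              if (pvL0Set node_depth).contains nb then d.modify e.1 [] (fun s => PySem.Set.add s nb)
              else d) d) d).getD n [] ↔
        p ∈ d.getD n [] ∨ ∃ e ∈ l, e.1 = n ∧ pvDepth node_depth e.1 = some 1 ∧ p ∈ e.2 ∧
          (pvL0Set node_depth).contains p = true := by
    intro l
    induction l with
    | nil => simp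
    | cons e t ih =>
      intro d
      simp only [List.foldl_cons]
      by_cases hd : pvDepth node_depth e.1 ≠ some 1
      · rw [if_pos hd, ih]
        simp only [List.mem_cons]
        constructor
        · rintro (h | ⟨e', he', rest⟩)
          · exact Or.inl h
          · exact Or.inr ⟨e', Or.inr he', rest⟩
        · rintro (h | ⟨e', (rfl | he'), h1, h2, rest⟩)
          · exact Or.inl h
          · exact absurd h2 hd
          · exact Or.inr ⟨e', he', h1, h2, rest⟩
      · push_neg at hd
        rw [if_neg (by simp [hd]), ih, pvL1A_inner_mem]
        simp only [List.mem_cons]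
        constructor
        · rintro (⟨h | ⟨h1, h2, h3⟩⟩ | ⟨e', he', rest⟩)
          · exact Or.inl h
          · exact Or.inr ⟨e, Or.inl rfl, h1.symm, hd, h2, h3⟩
          · exact Or.inr ⟨e', Or.inr he', rest⟩
        · rintro (h | ⟨e', (rfl | he'), h1, h2, h3, h4⟩)
          · exact Or.inl (Or.inl h)
          · exact Or.inl (Or.inr ⟨h1.symm, h3, h4⟩)
          · exact Or.inr ⟨e', he', h1, h2, h3, h4⟩
  rw [pvL1A, aux]
  simp

theorem pvExclA_mem (adj : List (String × List String)) (node_depth : List (String × Int))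
    (L : PySem.Dict String (PySem.Set String)) (S : PySem.Set String) (y : String) :
    y ∈ pvExclA adj node_depth L S ↔
      ∃ v ∈ S, y ∈ pvAdjGet adj v ∧ pvDepth node_depth y = some 1 ∧
        L.getD y [] ≠ [] ∧ PySem.Set.issubset (L.getD y []) S = true := by
  have inner : ∀ (l : List String) (ex : PySem.Set String),
      y ∈ l.foldl (fun ex n =>
          if pvDepth node_depth n ≠ some 1 then ex
          else if L.getD n [] ≠ [] ∧ PySem.Set.issubset (L.getD n []) S = true then PySem.Set.add ex n
          else ex) ex ↔
        y ∈ ex ∨ (y ∈ l ∧ pvDepth node_depth y = some 1 ∧ L.getD y [] ≠ [] ∧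
          PySem.Set.issubset (L.getD y []) S = true) := by
    intro l
    induction l with
    | nil => simp
    | cons n t ih =>
      intro ex
      simp only [List.foldl_cons]
      by_cases hd : pvDepth node_depth n ≠ some 1
      · rw [if_pos hd, ih]
        simp only [List.mem_cons]
        constructor
        · rintro (h | ⟨h1, rest⟩)
          · exact Or.inl h
          · exact Or.inr ⟨Or.inr h1, rest⟩
        · rintro (h | ⟨(rfl | h1), h2, rest⟩)
          · exact Or.inl h
          · exact absurd h2 hd
          · exact Or.inr ⟨h1, h2, rest⟩
      · push_neg at hd
        by_cases hc : L.getD n [] ≠ [] ∧ PySem.Set.issubset (L.getD n []) S = true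
        · rw [if_neg (by simp [hd]), if_pos hc, ih]
          simp only [PySem.Set.mem_add, List.mem_cons]
          constructor
          · rintro ((h | rfl) | ⟨h1, rest⟩)
            · exact Or.inl h
            · exact Or.inr ⟨Or.inl rfl, hd, hc⟩
            · exact Or.inr ⟨Or.inr h1, rest⟩
          · rintro (h | ⟨(rfl | h1), rest⟩)
            · exact Or.inl (Or.inl h)
            · exact Or.inl (Or.inr rfl)
            · exact Or.inr ⟨h1, rest⟩
        · rw [if_neg (by simp [hd]), if_neg hc, ih]
          simp only [List.mem_cons]
          constructor
          · rintro (h | ⟨h1, rest⟩)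
            · exact Or.inl h
            · exact Or.inr ⟨Or.inr h1, rest⟩
          · rintro (h | ⟨(rfl | h1), h2, h3, h4⟩)
            · exact Or.inl h
            · exact absurd ⟨h3, h4⟩ hc
            · exact Or.inr ⟨h1, h2, h3, h4⟩
  have outer : ∀ (sl : List String) (ex : PySem.Set String),
      y ∈ sl.foldl (fun ex v_id =>
          (pvAdjGet adj v_id).foldl (fun ex n =>
            if pvDepth node_depth n ≠ some 1 then ex
            else if L.getD n [] ≠ [] ∧ PySem.Set.issubset (L.getD n []) S = true then PySem.Set.add ex n
            else ex) ex) ex ↔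
        y ∈ ex ∨ ∃ v ∈ sl, y ∈ pvAdjGet adj v ∧ pvDepth node_depth y = some 1 ∧
          L.getD y [] ≠ [] ∧ PySem.Set.issubset (L.getD y []) S = true := by
    intro sl
    induction sl with
    | nil => simp
    | cons v t ih =>
      intro ex
      simp only [List.foldl_cons]
      rw [ih, inner]
      simp only [List.mem_cons]
      constructor
      · rintro ((h | ⟨h1, rest⟩) | ⟨v', hv', rest'⟩)
        · exact Or.inl h
        · exact Or.inr ⟨v, Or.inl rfl, h1, rest⟩
        · exact Or.inr ⟨v', Or.inr hv', rest'⟩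
      · rintro (h | ⟨v', (rfl | hv'), rest'⟩)
        · exact Or.inl (Or.inl h)
        · exact Or.inl (Or.inr rest')
        · exact Or.inr ⟨v', hv', rest'⟩
  rw [pvExclA, outer]
  simp

-- with unique adj keys, an adj entry IS the pvAdjGet lookup
theorem pvAdjGet_of_mem (adj : List (String × List String)) (hnd : (adj.map Prod.fst).Nodup)
    (e : String × List String) (he : e ∈ adj) : pvAdjGet adj e.1 = e.2 := by
  unfold pvAdjGet
  exact PySem.Dict.getD_of_mem_items (PySem.Dict.mk adj) (by simpa using he) (by simpa using hnd) []

-- with unique adj keys, A's l1_to_l0 entry at n is exactly B's filtered parent list (as sets)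
theorem pvL1A_getD_mem (adj : List (String × List String)) (node_depth : List (String × Int))
    (hnd : (adj.map Prod.fst).Nodup) (n p : String) :
    p ∈ (pvL1A adj node_depth).getD n [] ↔
      pvDepth node_depth n = some 1 ∧
        p ∈ (pvAdjGet adj n).filter (fun nb => (pvL0Set node_depth).contains nb) := by
  rw [pvL1A_mem]
  constructor
  · rintro ⟨e, he, rfl, hdep, hp2, hl0⟩
    rw [pvAdjGet_of_mem adj hnd e he]
    exact ⟨hdep, List.mem_filter.mpr ⟨hp2, hl0⟩⟩
  · rintro ⟨hdep, hp⟩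
    rw [List.mem_filter] at hp
    have hne : pvAdjGet adj n ≠ [] := List.ne_nil_of_mem hp.1
    have hcont : (PySem.Dict.mk adj).contains n = true := by
      rcases Bool.eq_false_or_eq_true ((PySem.Dict.mk adj).contains n) with hc | hc
      · exact hc
      · exact absurd (show pvAdjGet adj n = [] from PySem.Dict.getD_of_not_contains _ _ hc) hne
    obtain ⟨v, hv⟩ := Option.isSome_iff_exists.mp
      ((PySem.Dict.contains_eq_isSome_get? (PySem.Dict.mk adj) n) ▸ hcont)
    have hitems : (n, v) ∈ adj := by
      simpa using PySem.Dict.mem_items_of_get?_eq_some _ hv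
    have hget : pvAdjGet adj n = v := by
      unfold pvAdjGet; rw [PySem.Dict.getD_eq_get?_getD, hv]; rfl
    exact ⟨(n, v), hitems, rfl, hdep, hget ▸ hp.1, hp.2⟩

-- setdefault-then-modify is modify
theorem pvSetdefault_modify {κ ν : Type} [BEq κ] [LawfulBEq κ] (d : PySem.Dict κ ν) (k : κ)
    (d0 : ν) (f : ν → ν) :
    (d.setdefault k d0).modify k d0 f = d.modify k d0 f := by
  by_cases hc : d.contains k = true
  · rw [PySem.Dict.setdefault_of_contains _ _ hc]
  · rw [PySem.Dict.setdefault_of_not_contains _ _ (by simpa using hc)]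
    simp only [PySem.Dict.modify, PySem.Dict.getD_insert_self, PySem.Dict.insert_insert_self,
      PySem.Dict.getD_of_not_contains _ _ (by simpa using hc)]

-- A's set-difference-and-test step equals B's predicate step once memberships agree
theorem pvStep_agree (adj : List (String × List String)) (node_depth : List (String × Int))
    (ioc_key : PySem.Dict String String) (k : String) (removed : PySem.Set String)
    (q : String × String)
    (h : ∀ n ∈ pvAdjGet adj q.1, (n ∈ removed ↔ pvRemovedB adj node_depth ioc_key n k = true))
    (ts : PySem.Dict String (PySem.Dict String Int)) :
    pvStepA adj removed ts q = pvStepB adj node_depth ioc_key k ts q := by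
  have hmem : ∀ x, x ∈ PySem.Set.diff (pvAdjGet adj q.1) removed ↔
      (x ∈ pvAdjGet adj q.1 ∧ x ∉ removed) := by
    intro x
    simp only [PySem.Set.diff, List.mem_filter, Bool.not_eq_true']
    constructor
    · rintro ⟨h1, h2⟩
      refine ⟨h1, fun hc => ?_⟩
      rw [(PySem.Set.contains_iff removed x).mpr hc] at h2
      simp at h2
    · rintro ⟨h1, h2⟩
      refine ⟨h1, ?_⟩
      cases hb : removed.contains x
      · rfl
      · exact absurd ((PySem.Set.contains_iff removed x).mp hb) h2
  have hm : (PySem.Set.diff (pvAdjGet adj q.1) removed ≠ []) ↔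
      ((pvAdjGet adj q.1).any (fun n => !(pvRemovedB adj node_depth ioc_key n k)) = true) := by
    rw [List.any_eq_true]
    constructor
    · intro hne
      obtain ⟨x, hx⟩ := List.exists_mem_of_ne_nil _ hne
      rw [hmem x] at hx
      refine ⟨x, hx.1, ?_⟩
      cases hb : pvRemovedB adj node_depth ioc_key x k
      · rfl
      · exact absurd ((h x hx.1).mpr hb) hx.2
    · rintro ⟨x, hx, hb⟩
      refine List.ne_nil_of_mem ((hmem x).mpr ⟨hx, fun hc => ?_⟩)
      rw [(h x hx).mp hc] at hb
      simp at hb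
  simp only [pvStepA, pvStepB, pvSetdefault_modify]
  by_cases h1 : PySem.Set.diff (pvAdjGet adj q.1) removed ≠ []
  · rw [if_pos h1, if_pos (hm.mp h1)]
  · rw [if_neg h1, if_neg (fun hc => h1 (hm.mpr hc))]
    by_cases h2 : pvAdjGet adj q.1 = []
    · rw [if_pos h2, if_pos (List.isEmpty_iff.mpr h2)]
    · rw [if_neg h2, if_neg (fun hc => h2 (List.isEmpty_iff.mp hc))]

-- the heart: membership in A's removed set is B's removed predicate, for any
-- neighbour of an IoC of the report group
theorem pvRemoved_agree (l0_iocs : List (String × String)) (adj : List (String × List String))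
    (node_depth : List (String × Int)) (node_reports : List (String × List String))
    (hnd : (adj.map Prod.fst).Nodup)
    (ri : String × List (String × String)) (hri : ri ∈ (pvGroup l0_iocs node_reports).items)
    (q : String × String) (hq : q ∈ ri.2) (n : String) (hn : n ∈ pvAdjGet adj q.1) :
    (n ∈ PySem.Set.union (PySem.Set.ofList (ri.2.map (fun p => p.1)))
        (pvExclA adj node_depth (pvL1A adj node_depth) (PySem.Set.ofList (ri.2.map (fun p => p.1))))) ↔
    pvRemovedB adj node_depth (pvFirstB l0_iocs node_reports).1 n ri.1 = true := by
  have hri2 := pvGroup_mem_items l0_iocs node_reports ri hri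
  have hSmem : ∀ v, v ∈ PySem.Set.ofList (ri.2.map (fun p => p.1)) ↔
      (v ∈ l0_iocs.map Prod.fst ∧ pvKey node_reports v = ri.1) := by
    intro v
    rw [PySem.Set.mem_ofList, hri2]
    simp only [List.mem_map, List.mem_filter, beq_iff_eq]
    constructor
    · rintro ⟨p, ⟨hp, hk⟩, rfl⟩
      exact ⟨⟨p, hp, rfl⟩, hk⟩
    · rintro ⟨⟨p, hp, rfl⟩, hk⟩
      exact ⟨p, ⟨hp, hk⟩, rfl⟩
  have hik : ∀ v, v ∈ PySem.Set.ofList (ri.2.map (fun p => p.1)) ↔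
      (pvFirstB l0_iocs node_reports).1.get? v = some ri.1 := by
    intro v
    rw [hSmem, pvFirstB_fst_get?]
    by_cases hv : v ∈ l0_iocs.map Prod.fst <;> simp [hv]
  set S := PySem.Set.ofList (ri.2.map (fun p => p.1)) with hS
  set ik := (pvFirstB l0_iocs node_reports).1 with hikd
  rw [PySem.Set.mem_union]
  unfold pvRemovedB
  by_cases hnS : n ∈ S
  · rw [if_pos (by simp [(hik n).mp hnS])]
    simp [hnS]
  · rw [if_neg (by
      intro hc
      simp only [beq_iff_eq] at hc
      exact hnS ((hik n).mpr hc))]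
    simp only [hnS, false_or]
    by_cases hdep : pvDepth node_depth n = some 1
    · rw [if_neg (by simp [hdep])]
      rw [pvExclA_mem]
      constructor
      · rintro ⟨v, hvS, hnadj, _, hLne, hLsub⟩
        obtain ⟨p0, hp0⟩ := List.exists_mem_of_ne_nil _ hLne
        have hp0' := (pvL1A_getD_mem adj node_depth hnd n p0).mp hp0
        have hpne : ¬ ((pvAdjGet adj n).filter
            (fun nb => (pvL0Set node_depth).contains nb)).isEmpty = true := by
          rw [List.isEmpty_iff]
          exact fun hcon => (List.ne_nil_of_mem hp0'.2) hcon
        simp only [Bool.and_eq_true, Bool.not_eq_true']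
        refine ⟨by simpa using hpne, ?_⟩
        rw [List.all_eq_true]
        intro p hp
        have hpL : p ∈ (pvL1A adj node_depth).getD n [] :=
          (pvL1A_getD_mem adj node_depth hnd n p).mpr ⟨hdep, hp⟩
        have := (PySem.Set.issubset_iff _ _).mp hLsub p hpL
        simpa using (hik p).mp this
      · intro hb
        simp only [Bool.and_eq_true, Bool.not_eq_true', List.all_eq_true] at hb
        obtain ⟨hpe, hall⟩ := hb
        have hq1S : q.1 ∈ S := by
          rw [hS, PySem.Set.mem_ofList]
          exact List.mem_map_of_mem hq
        have hLeq : ∀ p, p ∈ (pvL1A adj node_depth).getD n [] ↔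
            p ∈ (pvAdjGet adj n).filter (fun nb => (pvL0Set node_depth).contains nb) := by
          intro p
          rw [pvL1A_getD_mem adj node_depth hnd n p]
          simp [hdep]
        have hpe' : (pvAdjGet adj n).filter (fun nb => (pvL0Set node_depth).contains nb) ≠ [] := by
          intro hc
          rw [hc] at hpe
          simp at hpe
        obtain ⟨p0, hp0⟩ := List.exists_mem_of_ne_nil _ hpe' 
        refine ⟨q.1, hq1S, hn, hdep, List.ne_nil_of_mem ((hLeq p0).mpr hp0), ?_⟩
        rw [PySem.Set.issubset_iff]
        intro p hp
        have hpf := (hLeq p).mp hp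
        have := hall p hpf
        exact (hik p).mpr (by simpa using this)
    · rw [if_pos (by simp [hdep])]
      simp only [Bool.false_eq_true, iff_false]
      intro hc
      rw [pvExclA_mem] at hc
      obtain ⟨_, _, _, hdep', _⟩ := hc
      exact hdep hdep'

-- ===== VERDICT (by name: the statement is the Claim_ definition above) =====
theorem analyze_no_match_deeper_spec : Claim_equal_analyze_no_match_deeper := by
  intro l0_iocs adj node_depth node_reports _hdom hpre
  unfold Spec_analyze_no_match_deeper
  unfold analyze_no_match_deeper analyze_no_match_deeper_alt
  have hsnd : (pvFirstB l0_iocs node_reports).2 = pvGroup l0_iocs node_reports := by rw [pvFirstB_eq]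
  rw [hsnd]
  refine congrArg (fun d : PySem.Dict String (PySem.Dict String Int) =>
    d.items.map (fun p => (p.1, p.2.items))) ?_
  apply PySem.List.foldl_congr_mem
  intro ts ri hri
  apply PySem.List.foldl_congr_mem
  intro acc q hq
  apply pvStep_agree
  intro n hn
  exact pvRemoved_agree l0_iocs adj node_depth node_reports hpre ri hri q hq n hn
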